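-- pv_equiv track=rewrite | github.com/anupam-majumder/Movie-Recommendation-System | src/app/recommender/Predictor.py | make_user_movie_dict
-- ===== SOURCE A (Python) =====
-- def make_user_movie_dict(users_list, movies_list, ratings_list):
--     user_movie = dict()
--     for i in range(len(users_list)):
--         temp = [ratings_list[i],movies_list[i]]
--         try :
--             user_movie[users_list[i]].append(temp)
--             user_movie[users_list[i]].sort(reverse=True)
--         except KeyError :
--             user_movie[users_list[i]] = list()
--             user_movie[users_list[i]].append(temp)
--     return user_movie
-- ===== SOURCE B (Python) =====
-- def make_user_movie_dict(users_list, movies_list, ratings_list):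
--     # One global stable descending sort of all indices by [rating, movie],
--     # then a single distribution pass; no per-user sorting at all.
--     n = len(users_list)
--     order = sorted(range(n), key=lambda i: [ratings_list[i], movies_list[i]], reverse=True)
--     user_movie = {}
--     for u in users_list:            # keys in first-occurrence order, as the caller sees them
--         user_movie.setdefault(u, [])
--     for i in order:
--         user_movie[users_list[i]].append([ratings_list[i], movies_list[i]])
--     return user_movie
-- ===== Notes on version B (the rewrite author's own statement) =====
-- stated objective: faster
-- what changed: Instead of re-sorting a user's list after every append, B sorts all indices once globally (descending by [rating, movie]) and then distributes them to the users in one pass, relying on sort stability.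
import Mathlib
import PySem

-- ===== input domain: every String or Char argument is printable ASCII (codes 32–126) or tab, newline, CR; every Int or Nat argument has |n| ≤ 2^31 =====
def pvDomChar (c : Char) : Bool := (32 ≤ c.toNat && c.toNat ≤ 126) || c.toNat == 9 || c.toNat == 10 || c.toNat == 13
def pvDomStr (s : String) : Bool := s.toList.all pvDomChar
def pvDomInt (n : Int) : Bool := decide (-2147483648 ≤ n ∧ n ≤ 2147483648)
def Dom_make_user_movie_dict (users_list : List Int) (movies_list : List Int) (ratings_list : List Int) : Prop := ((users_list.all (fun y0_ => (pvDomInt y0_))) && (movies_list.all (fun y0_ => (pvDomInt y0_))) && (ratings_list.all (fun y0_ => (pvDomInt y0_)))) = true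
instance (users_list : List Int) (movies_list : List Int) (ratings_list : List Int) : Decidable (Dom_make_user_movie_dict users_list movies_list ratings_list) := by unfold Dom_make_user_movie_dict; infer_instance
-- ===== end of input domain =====

-- B replaces A's re-sort-after-every-append by ONE global stable descending sort of the indices
-- followed by a single distribution pass (objective: faster).

-- shared accessors: users_list[i] and the pair [ratings_list[i], movies_list[i]]
def pvUser (users_list : List Int) (i : Int) : Int := PySem.List.pyGetD users_list i 0
def pvPair (movies_list : List Int) (ratings_list : List Int) (i : Int) : List Int :=
  [PySem.List.pyGetD ratings_list i 0, PySem.List.pyGetD movies_list i 0]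

-- ===== PORT A =====
def make_user_movie_dict (users_list : List Int) (movies_list : List Int) (ratings_list : List Int) : List (Int × List (List Int)) :=
  -- for i in range(len(users_list)): try append+sort(reverse=True) except KeyError: fresh one-element list
  ((PySem.List.pyRange 0 users_list.length 1).foldl
    (fun d i =>
      d.insert (pvUser users_list i)
        (match d.get? (pvUser users_list i) with
         | some l => PySem.List.sorted (l ++ [pvPair movies_list ratings_list i]) (fun x => x) true
         | none => [pvPair movies_list ratings_list i]))
    PySem.Dict.empty).items

-- ===== PORT B =====
def make_user_movie_dict_alt (users_list : List Int) (movies_list : List Int) (ratings_list : List Int) : List (Int × List (List Int)) :=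
  let order := PySem.List.sorted (PySem.List.pyRange 0 users_list.length 1)
      (fun i => pvPair movies_list ratings_list i) true
  let d0 := users_list.foldl (fun d u => d.setdefault u []) PySem.Dict.empty
  (order.foldl
    (fun d i => d.modify (pvUser users_list i) [] (fun l => l ++ [pvPair movies_list ratings_list i]))
    d0).items

-- ===== PRECONDITION & SPEC =====
-- A raises IndexError when movies_list or ratings_list is shorter than users_list; excluded here.
def Pre_make_user_movie_dict (users_list : List Int) (movies_list : List Int) (ratings_list : List Int) : Prop :=
  users_list.length ≤ movies_list.length ∧ users_list.length ≤ ratings_list.length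
instance (users_list : List Int) (movies_list : List Int) (ratings_list : List Int) : Decidable (Pre_make_user_movie_dict users_list movies_list ratings_list) := by unfold Pre_make_user_movie_dict; infer_instance
def pvWitness_make_user_movie_dict : List Int × List Int × List Int := ([1, 2, 1, 1], [10, 20, 30, 5], [3, 4, 3, 5])

def Spec_make_user_movie_dict (users_list : List Int) (movies_list : List Int) (ratings_list : List Int) (out : List (Int × List (List Int))) : Prop := out = make_user_movie_dict_alt users_list movies_list ratings_list
instance (users_list : List Int) (movies_list : List Int) (ratings_list : List Int) (out : List (Int × List (List Int))) : Decidable (Spec_make_user_movie_dict users_list movies_list ratings_list out) := by unfold Spec_make_user_movie_dict; infer_instance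

-- ===== CLAIM (what is proved, stated in full; the proofs are below) =====
def Claim_equal_make_user_movie_dict : Prop := ∀ (users_list : List Int) (movies_list : List Int) (ratings_list : List Int), Dom_make_user_movie_dict users_list movies_list ratings_list → Pre_make_user_movie_dict users_list movies_list ratings_list → Spec_make_user_movie_dict users_list movies_list ratings_list (make_user_movie_dict users_list movies_list ratings_list)

-- ===== LEMMAS AND PROOFS =====

-- proof-side abbreviations for the three folds
def pvDictA (users_list movies_list ratings_list : List Int) (l : List Int) : PySem.Dict Int (List (List Int)) :=
  l.foldl
    (fun d i =>
      d.insert (pvUser users_list i)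
        (match d.get? (pvUser users_list i) with
         | some v => PySem.List.sorted (v ++ [pvPair movies_list ratings_list i]) (fun x => x) true
         | none => [pvPair movies_list ratings_list i]))
    PySem.Dict.empty

def pvDictB0 (l : List Int) : PySem.Dict Int (List (List Int)) :=
  l.foldl (fun d u => d.setdefault u []) PySem.Dict.empty

def pvDictB (users_list movies_list ratings_list : List Int) (l : List Int)
    (d : PySem.Dict Int (List (List Int))) : PySem.Dict Int (List (List Int)) :=
  l.foldl
    (fun d i => d.modify (pvUser users_list i) [] (fun v => v ++ [pvPair movies_list ratings_list i])) d

lemma pvA_eq (users_list movies_list ratings_list : List Int) :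
    make_user_movie_dict users_list movies_list ratings_list
      = (pvDictA users_list movies_list ratings_list (PySem.List.pyRange 0 users_list.length 1)).items := rfl

lemma pvB_eq (users_list movies_list ratings_list : List Int) :
    make_user_movie_dict_alt users_list movies_list ratings_list
      = (pvDictB users_list movies_list ratings_list
          (PySem.List.sorted (PySem.List.pyRange 0 users_list.length 1)
            (fun i => pvPair movies_list ratings_list i) true)
          (pvDictB0 users_list)).items := rfl

-- two different (but propositionally equal) DecidableLT instances on List Int appear below
lemma pvInstEq : (fun (a b : List Int) => a.decidableLT b) = (LinearOrder.toDecidableLT : DecidableLT (List Int)) := by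
  funext a b; exact Subsingleton.elim _ _
lemma pvSorted_inst {α : Type} (xs : List α) (key : α → List Int) (rev : Bool) :
    @PySem.List.sorted α (List Int) List.instLT (fun a b => a.decidableLT b) xs key rev
      = @PySem.List.sorted α (List Int) List.instLinearOrder.toLT LinearOrder.toDecidableLT xs key rev := by
  rw [pvInstEq]

lemma pvRange_eq (n : Nat) : PySem.List.pyRange 0 n = (List.range n).map Int.ofNat := by
  simp [PySem.List.pyRange]
  rcases Nat.eq_zero_or_pos n with h | h
  · simp [h]
  · simp [h, List.map_eq_flatMap]

-- the indices of range(len(users_list)), mapped through users_list[i], give back users_list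
lemma pvMap_user_range (users_list : List Int) :
    (PySem.List.pyRange 0 users_list.length 1).map (pvUser users_list) = users_list := by
  rw [pvRange_eq, List.map_map]
  apply List.ext_getElem (by simp)
  intro i h1 h2
  simp only [List.getElem_map, List.getElem_range, Function.comp_apply, pvUser]
  rw [PySem.List.pyGetD_of_nonneg _ _ (by exact Int.natCast_nonneg i)]
  simp [List.getD_eq_getElem?_getD, List.getElem?_eq_getElem h2]

-- two descending permutations of each other are equal
lemma pvDesc_unique (v w : List (List Int)) (hp : v.Perm w)
    (hv : v.Pairwise (fun a b => b ≤ a)) (hw : w.Pairwise (fun a b => b ≤ a)) : v = w := by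
  have h := PySem.List.eq_of_perm_of_pairwise_le_of_injective (l₁ := v.reverse) (l₂ := w.reverse)
    (fun x => x) (fun a b h => h)
    (by exact (v.reverse_perm.trans hp).trans w.reverse_perm.symm)
    (by rw [List.pairwise_reverse]; exact hv)
    (by rw [List.pairwise_reverse]; exact hw)
  simpa using congrArg List.reverse h

-- A's dictionary: a key is present iff it occurs among the processed users, and then it
-- holds a descending permutation of that user's pairs
lemma pvA_char (users_list movies_list ratings_list : List Int) (l : List Int) (c : Int) :
    ((pvDictA users_list movies_list ratings_list l).get? c = none ∧ c ∉ l.map (pvUser users_list)) ∨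
    (∃ v, (pvDictA users_list movies_list ratings_list l).get? c = some v ∧ c ∈ l.map (pvUser users_list) ∧
      v.Perm ((l.filter (fun i => pvUser users_list i == c)).map (pvPair movies_list ratings_list)) ∧
      v.Pairwise (fun a b => b ≤ a)) := by
  induction l using List.reverseRecOn with
  | nil => left; exact ⟨PySem.Dict.get?_empty c, by simp⟩
  | append_singleton t i ih =>
      have hstep : pvDictA users_list movies_list ratings_list (t ++ [i])
          = (pvDictA users_list movies_list ratings_list t).insert (pvUser users_list i)
              (match (pvDictA users_list movies_list ratings_list t).get? (pvUser users_list i) with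
               | some v => PySem.List.sorted (v ++ [pvPair movies_list ratings_list i]) (fun x => x) true
               | none => [pvPair movies_list ratings_list i]) := by
        simp [pvDictA, List.foldl_append]
      by_cases hc : c = pvUser users_list i
      · right
        subst hc
        rcases ih with ⟨hnone, hmem⟩ | ⟨v, hsome, hmem, hperm, hpw⟩
        · refine ⟨[pvPair movies_list ratings_list i], ?_, by simp, ?_, by simp⟩
          · rw [hstep, hnone, PySem.Dict.get?_insert]
            simp
          · have hfilt : t.filter (fun j => pvUser users_list j == pvUser users_list i) = [] := by
              rw [List.filter_eq_nil_iff]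
              intro j hj hbeq
              exact hmem (List.mem_map.mpr ⟨j, hj, by simpa using hbeq⟩)
            simp [List.filter_append, hfilt]
        · refine ⟨PySem.List.sorted (v ++ [pvPair movies_list ratings_list i]) (fun x => x) true,
            ?_, by simp, ?_, ?_⟩
          · rw [hstep, hsome, PySem.Dict.get?_insert]
            simp
          · have h1 := PySem.List.sorted_perm (v ++ [pvPair movies_list ratings_list i]) (fun x => x) true
            refine h1.trans ?_
            rw [List.filter_append, List.map_append]
            simpa using hperm.append_right [pvPair movies_list ratings_list i]
          · rw [pvSorted_inst]
            simpa using PySem.List.sorted_pairwise_rev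
              (v ++ [pvPair movies_list ratings_list i]) (fun x => x)
      · have hget : (pvDictA users_list movies_list ratings_list (t ++ [i])).get? c
            = (pvDictA users_list movies_list ratings_list t).get? c := by
          rw [hstep, PySem.Dict.get?_insert]
          simp [hc]
        have hfilt : (t ++ [i]).filter (fun j => pvUser users_list j == c)
            = t.filter (fun j => pvUser users_list j == c) := by
          rw [List.filter_append]
          simp [show (pvUser users_list i == c) = false from by simpa using Ne.symm hc]
        have hmem' : c ∈ (t ++ [i]).map (pvUser users_list) ↔ c ∈ t.map (pvUser users_list) := by
          simp [hc]
        rcases ih with ⟨hnone, hmem⟩ | ⟨v, hsome, hmem, hperm, hpw⟩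
        · left; exact ⟨by rw [hget]; exact hnone, by rw [hmem']; exact hmem⟩
        · right; exact ⟨v, by rw [hget]; exact hsome, by rw [hmem']; exact hmem,
            by rw [hfilt]; exact hperm, hpw⟩

-- B's base dict: the setdefault loop gives every user the empty list
lemma pvB0_get?_aux (l : List Int) (d : PySem.Dict Int (List (List Int))) (c : Int)
    (hd : ∀ k, d.get? k = none ∨ d.get? k = some []) :
    (l.foldl (fun d u => d.setdefault u []) d).get? c
      = if c ∈ l ∨ (d.get? c).isSome then some [] else none := by
  induction l generalizing d with
  | nil =>
      rcases hd c with h | h <;> simp [h]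
  | cons x t ih =>
      show (t.foldl (fun d u => d.setdefault u []) (d.setdefault x [])).get? c = _
      rw [ih (d.setdefault x []) ?_]
      · by_cases hcx : c = x
        · subst hcx
          simp [PySem.Dict.get?_setdefault_self]
        · rw [PySem.Dict.get?_setdefault_of_ne _ _ hcx]
          simp [List.mem_cons, hcx]
      · intro k
        by_cases hkx : k = x
        · subst hkx
          rcases hd k with h | h <;> simp [PySem.Dict.get?_setdefault_self, h]
        · rw [PySem.Dict.get?_setdefault_of_ne _ _ hkx]; exact hd k

lemma pvB0_get? (l : List Int) (c : Int) :
    (pvDictB0 l).get? c = if c ∈ l then some [] else none := by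
  rw [pvDictB0, pvB0_get?_aux l PySem.Dict.empty c (fun k => Or.inl (PySem.Dict.get?_empty k))]
  simp [PySem.Dict.get?_empty]

-- keys of B's base dict
lemma pvB0_keys_aux (l : List Int) (d : PySem.Dict Int (List (List Int))) :
    (l.foldl (fun d u => d.setdefault u []) d).keys = PySem.Set.update d.keys l := by
  induction l generalizing d with
  | nil => rfl
  | cons x t ih =>
      show (t.foldl (fun d u => d.setdefault u []) (d.setdefault x [])).keys = _
      rw [ih]
      show _ = PySem.Set.update (PySem.Set.add d.keys x) t
      congr 1
      rw [PySem.Dict.keys_setdefault]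
      by_cases h : d.contains x = true
      · simp [h, PySem.Set.add, (PySem.Dict.contains_iff_mem_keys d x).mp h]
      · have hx : x ∉ d.keys := fun hm =>
          absurd ((PySem.Dict.contains_iff_mem_keys d x).mpr hm) (by simpa using h)
        simp [h, PySem.Set.add, hx]

lemma pvB0_keys (l : List Int) :
    (pvDictB0 l).keys = PySem.Set.update ([] : PySem.Set Int) l := by
  rw [pvDictB0, pvB0_keys_aux, PySem.Dict.keys_empty]

-- B's distribution loop, on the getD level
lemma pvBmod_getD (users_list movies_list ratings_list : List Int) (l : List Int)
    (d : PySem.Dict Int (List (List Int))) (c : Int) :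
    (pvDictB users_list movies_list ratings_list l d).getD c []
      = d.getD c [] ++ (l.filter (fun i => pvUser users_list i == c)).map (pvPair movies_list ratings_list) := by
  induction l generalizing d with
  | nil => simp [pvDictB]
  | cons x t ih =>
      show (pvDictB users_list movies_list ratings_list t
        (d.modify (pvUser users_list x) [] (fun v => v ++ [pvPair movies_list ratings_list x]))).getD c [] = _
      rw [ih]
      rw [PySem.Dict.getD_modify]
      by_cases h : c = pvUser users_list x
      · simp [h]
      · simp [h, show (pvUser users_list x == c) = false from by
          simpa using Ne.symm h]

-- a Set.update by elements already present changes nothing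
lemma pvSet_update_of_subset (l : List Int) (s : PySem.Set Int) (h : ∀ x ∈ l, x ∈ s) :
    PySem.Set.update s l = s := by
  induction l generalizing s with
  | nil => rfl
  | cons x t ih =>
      have hx : x ∈ s := h x (by simp)
      have hadd : PySem.Set.add s x = s := by
        simp only [PySem.Set.add]
        rw [if_pos (by simpa [List.contains_iff_mem] using hx)]
      show PySem.Set.update (PySem.Set.add s x) t = s
      rw [hadd]
      exact ih s (fun y hy => h y (by simp [hy]))

-- keys of A's dictionary
lemma pvA_keys (users_list movies_list ratings_list : List Int) :
    (pvDictA users_list movies_list ratings_list (PySem.List.pyRange 0 users_list.length 1)).keys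
      = PySem.Set.ofList users_list := by
  have h := PySem.Dict.keys_foldl_insert_key
    (PySem.List.pyRange 0 users_list.length 1) (pvUser users_list)
    (fun d i =>
      (match d.get? (pvUser users_list i) with
       | some v => PySem.List.sorted (v ++ [pvPair movies_list ratings_list i]) (fun x => x) true
       | none => [pvPair movies_list ratings_list i]))
    (PySem.Dict.empty)
  rw [pvDictA]
  rw [h, PySem.Dict.keys_empty, pvMap_user_range]
  rfl

-- keys of B's dictionary
lemma pvB_keys (users_list movies_list ratings_list : List Int) :
    (pvDictB users_list movies_list ratings_list
      (PySem.List.sorted (PySem.List.pyRange 0 users_list.length 1)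
        (fun i => pvPair movies_list ratings_list i) true)
      (pvDictB0 users_list)).keys = PySem.Set.ofList users_list := by
  have h := PySem.Dict.keys_foldl_modify_key
    (PySem.List.sorted (PySem.List.pyRange 0 users_list.length 1)
      (fun i => pvPair movies_list ratings_list i) true)
    (pvUser users_list) ([] : List (List Int))
    (fun d i => fun v => v ++ [pvPair movies_list ratings_list i])
    (pvDictB0 users_list)
  rw [pvDictB, h, pvB0_keys]
  have hofl : PySem.Set.update ([] : PySem.Set Int) users_list = PySem.Set.ofList users_list := rfl
  rw [hofl]
  apply pvSet_update_of_subset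
  intro x hx
  rcases List.mem_map.mp hx with ⟨i, hi, hxi⟩
  rw [PySem.Set.mem_ofList]
  have hi' : i ∈ PySem.List.pyRange 0 users_list.length 1 :=
    (PySem.List.mem_sorted _ _ _ _).mp hi
  rw [← pvMap_user_range users_list]
  exact List.mem_map.mpr ⟨i, hi', hxi⟩

-- the per-key values agree
lemma pvVal_eq (users_list movies_list ratings_list : List Int) (k : Int) (hk : k ∈ users_list) :
    (pvDictA users_list movies_list ratings_list (PySem.List.pyRange 0 users_list.length 1)).getD k []
      = (pvDictB users_list movies_list ratings_list
          (PySem.List.sorted (PySem.List.pyRange 0 users_list.length 1)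
            (fun i => pvPair movies_list ratings_list i) true)
          (pvDictB0 users_list)).getD k [] := by
  have hkm : k ∈ (PySem.List.pyRange 0 users_list.length 1).map (pvUser users_list) := by
    rw [pvMap_user_range]; exact hk
  -- A side
  rcases pvA_char users_list movies_list ratings_list (PySem.List.pyRange 0 users_list.length 1) k with
    ⟨_, habs⟩ | ⟨v, hsome, _, hperm, hpw⟩
  · exact absurd hkm habs
  -- B side
  have hB : (pvDictB users_list movies_list ratings_list
        (PySem.List.sorted (PySem.List.pyRange 0 users_list.length 1)
          (fun i => pvPair movies_list ratings_list i) true)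
        (pvDictB0 users_list)).getD k []
      = ((PySem.List.sorted (PySem.List.pyRange 0 users_list.length 1)
          (fun i => pvPair movies_list ratings_list i) true).filter
            (fun i => pvUser users_list i == k)).map (pvPair movies_list ratings_list) := by
    rw [pvBmod_getD, PySem.Dict.getD_eq_get?_getD, pvB0_get?]
    simp [hk]
  rw [hB, PySem.Dict.getD_eq_get?_getD, hsome]
  -- both sides are descending permutations of the same multiset
  have hpermB : (((PySem.List.sorted (PySem.List.pyRange 0 users_list.length 1)
        (fun i => pvPair movies_list ratings_list i) true).filter
          (fun i => pvUser users_list i == k)).map (pvPair movies_list ratings_list)).Perm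
      (((PySem.List.pyRange 0 users_list.length 1).filter
          (fun i => pvUser users_list i == k)).map (pvPair movies_list ratings_list)) :=
    ((PySem.List.sorted_perm _ _ _).filter _).map _
  have hpwB : (((PySem.List.sorted (PySem.List.pyRange 0 users_list.length 1)
        (fun i => pvPair movies_list ratings_list i) true).filter
          (fun i => pvUser users_list i == k)).map (pvPair movies_list ratings_list)).Pairwise
      (fun a b => b ≤ a) := by
    apply List.pairwise_map.mpr
    apply List.Pairwise.filter
    rw [pvSorted_inst]
    exact PySem.List.sorted_pairwise_rev _ _
  simp only [Option.getD_some]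
  exact pvDesc_unique _ _ (hperm.trans hpermB.symm) hpw hpwB

-- ===== VERDICT (by name: the statement is the Claim_ definition above) =====
theorem make_user_movie_dict_spec : Claim_equal_make_user_movie_dict := by
  intro users_list movies_list ratings_list _ _
  show make_user_movie_dict users_list movies_list ratings_list
      = make_user_movie_dict_alt users_list movies_list ratings_list
  rw [pvA_eq, pvB_eq]
  have hndA := PySem.Set.nodup_ofList users_list
  have hkA := pvA_keys users_list movies_list ratings_list
  have hkB := pvB_keys users_list movies_list ratings_list
  rw [PySem.Dict.items_eq_map_keys _ (by rw [hkA]; exact hndA) ([] : List (List Int)),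
      PySem.Dict.items_eq_map_keys _ (by rw [hkB]; exact hndA) ([] : List (List Int)),
      hkA, hkB]
  apply List.map_congr_left
  intro k hkmem
  have hk : k ∈ users_list := (PySem.Set.mem_ofList users_list k).mp hkmem
  rw [pvVal_eq users_list movies_list ratings_list k hk]
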